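-- pv_equiv track=rewrite | github.com/claraantelocernadas/repo_colaborativo | funciones_habitos.py | analizar_habitos
-- ===== SOURCE A (Python) =====
-- def analizar_habitos(lista):
--     '''
--     Cuenta cuantas veces aparece cada actividad ingresada por el usuario
--
--     Parameters
--     ----------
--     lista : list
--         una lista de todas las actividades ingresadas por el usuario
--
--     Returns
--     -------
--     diccionario
--         diccionario contador de frecuencias de cuantas veces ingresa el usuario esa actividad
--
--     '''
--
--     resultado = {}
--
--     for actividad in lista:
--         if actividad in resultado:
--             resultado [actividad]+=1
--         else:
--            resultado [actividad] = 1
--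
--     return resultado
-- ===== SOURCE B (Python) =====
-- def analizar_habitos(lista):
--     unicos = dict.fromkeys(lista)
--     return {actividad: lista.count(actividad) for actividad in unicos}
-- ===== Notes on version B (the rewrite author's own statement) =====
-- stated objective: idiomatic
-- what changed: Replaces A's single accumulating pass (conditional increment into a dict) with an ordered de-dup via dict.fromkeys followed by a dict comprehension that counts each distinct activity with lista.count.
import Mathlib
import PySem

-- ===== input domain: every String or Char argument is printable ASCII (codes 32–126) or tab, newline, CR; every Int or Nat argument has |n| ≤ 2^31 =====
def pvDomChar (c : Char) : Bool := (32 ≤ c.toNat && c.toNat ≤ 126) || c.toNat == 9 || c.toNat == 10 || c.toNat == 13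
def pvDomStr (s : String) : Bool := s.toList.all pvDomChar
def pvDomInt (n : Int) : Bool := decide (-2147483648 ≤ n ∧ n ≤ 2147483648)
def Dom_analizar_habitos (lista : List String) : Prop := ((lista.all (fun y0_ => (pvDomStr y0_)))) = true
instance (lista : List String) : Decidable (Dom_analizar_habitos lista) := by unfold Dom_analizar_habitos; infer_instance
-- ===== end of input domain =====

-- B replaces A's single accumulating counting pass with an ordered de-dup (dict.fromkeys) plus a per-activity rescan count; objective: idiomatic, no speed claimed.


-- ===== PORT A =====
-- A: one pass, conditional increment into an insertion-ordered dict
def analizar_habitos (lista : List String) : List (String × Int) :=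
  (lista.foldl
    (fun resultado actividad =>
      if resultado.contains actividad then resultado.modify actividad 0 (· + 1)
      else resultado.insert actividad 1)
    PySem.Dict.empty).items

-- ===== PORT B =====
-- B: ordered de-dup (dict.fromkeys), then count each distinct activity by rescanning
def analizar_habitos_alt (lista : List String) : List (String × Int) :=
  (PySem.List.dedup lista).map (fun actividad => (actividad, (lista.count actividad : Int)))

-- ===== PRECONDITION & SPEC =====
def Spec_analizar_habitos (lista : List String) (out : List (String × Int)) : Prop := out = analizar_habitos_alt lista
instance (lista : List String) (out : List (String × Int)) : Decidable (Spec_analizar_habitos lista out) := by unfold Spec_analizar_habitos; infer_instance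

-- ===== CLAIM (what is proved, stated in full; the proofs are below) =====
def Claim_equal_analizar_habitos : Prop := ∀ (lista : List String), Dom_analizar_habitos lista → Spec_analizar_habitos lista (analizar_habitos lista)

-- ===== LEMMAS AND PROOFS =====

-- ===== VERDICT (by name: the statement is the Claim_ definition above) =====
lemma stepA_eq_counter_step (d : PySem.Dict String Int) (a : String) :
    (if d.contains a then d.modify a 0 (· + 1) else d.insert a 1) = d.modify a 0 (· + 1) := by
  by_cases h : d.contains a = true
  · simp [h]
  · simp only [Bool.not_eq_true] at h
    simp [h, PySem.Dict.modify, PySem.Dict.getD_of_not_contains (h := h)]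

theorem analizar_habitos_spec : Claim_equal_analizar_habitos := by
  intro lista _
  unfold Spec_analizar_habitos analizar_habitos analizar_habitos_alt
  simp only [stepA_eq_counter_step, ← PySem.Dict.counter_eq_foldl,
    PySem.Dict.items_counter, PySem.List.dedup_eq_ofList]
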